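-- pv_equiv track=rewrite | github.com/Mohitchatterjee/Ineuron_Interview_Practice | python_answer_1.py | evaluateHighestFreqWord
-- ===== SOURCE A (Python) =====
-- def evaluateHighestFreqWord(sentence) -> int:
--     word_list = sentence.split(' ')
--     tempDir = {}
--     for word in word_list:
--         count = 1
--         if word not in tempDir.keys():
--             tempDir[word] = count
--         else:
--             tem_val = tempDir[word]
--             tempDir[word] = tem_val+1
--     maxFreqWord = max(zip(tempDir.values(), tempDir.keys()))[1]
--     return len(maxFreqWord)
-- ===== SOURCE B (Python) =====
-- def evaluateHighestFreqWord(sentence) -> int: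
--     counts = {}
--     for word in sentence.split(' '):
--         counts[word] = counts.get(word, 0) + 1
--     items = sorted(counts.items(), key=lambda kv: (kv[1], kv[0]))
--     return len(items[-1][0])
-- ===== Notes on version B (the rewrite author's own statement) =====
-- stated objective: alternative
-- what changed: B builds the frequency table with dict.get in one uniform pass and selects the winner by sorting the items ascending on (count, word) and taking the last, instead of A's membership-branching dict build followed by a single max-scan over zip(values, keys).
import Mathlib
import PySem

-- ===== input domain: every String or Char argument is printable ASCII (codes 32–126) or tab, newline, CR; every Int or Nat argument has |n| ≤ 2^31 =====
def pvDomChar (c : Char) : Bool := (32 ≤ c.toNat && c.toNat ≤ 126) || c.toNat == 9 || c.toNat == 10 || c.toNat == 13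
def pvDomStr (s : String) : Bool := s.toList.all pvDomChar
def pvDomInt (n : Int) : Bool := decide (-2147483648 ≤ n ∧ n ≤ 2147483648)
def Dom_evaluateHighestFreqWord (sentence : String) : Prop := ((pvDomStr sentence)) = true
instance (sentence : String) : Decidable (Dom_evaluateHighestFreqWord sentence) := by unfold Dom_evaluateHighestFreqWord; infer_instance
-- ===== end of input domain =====

-- B replaces A's membership-branching dict build + single max-scan over zip(values, keys)
-- by a uniform dict.get build and a sort of the items on (count, word) taking the last (objective: alternative).


-- ===== PORT A =====
-- sentence.split(' '): sep " " ≠ "" so split? is always `some`; getD [] is never taken.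
-- tempDir[word] in the else-branch: the key is present (contains = true), so getD word 0 is exact.
-- max(zip(...)) on the empty dict would raise ValueError, but the dict is never empty
-- (split(' ') always returns a nonempty list); the `none` arm is unreachable.
def evaluateHighestFreqWord (sentence : String) : Int :=
  let wordList := (PySem.Str.split? sentence " ").getD []
  let tempDir := wordList.foldl (fun d word =>
    if d.contains word = false then
      d.insert word 1
    else
      let temVal := d.getD word 0
      d.insert word (temVal + 1)) ((PySem.Dict.empty : PySem.Dict String Int))
  match PySem.List.max2? (tempDir.values.zip tempDir.keys) (fun p => p.1) (fun p => p.2) with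
  | some maxPair => (PySem.Str.len maxPair.2 : Int)
  | none => 0

-- ===== PORT B =====
-- counts.get(word, 0) is Dict.getD; sorted(items, key=(count, word)) is sorted2;
-- items[-1] on the empty list would raise IndexError, but counts is never empty: `none` arm unreachable.
def evaluateHighestFreqWord_alt (sentence : String) : Int :=
  let counts := ((PySem.Str.split? sentence " ").getD []).foldl
      (fun d word => d.insert word (d.getD word 0 + 1)) ((PySem.Dict.empty : PySem.Dict String Int))
  let items := PySem.List.sorted2 counts.items (fun kv => kv.2) (fun kv => kv.1)
  match PySem.List.pyGet? items (-1) with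
  | some last => (PySem.Str.len last.1 : Int)
  | none => 0

-- ===== PRECONDITION & SPEC =====
def Spec_evaluateHighestFreqWord (sentence : String) (out : Int) : Prop := out = evaluateHighestFreqWord_alt sentence
instance (sentence : String) (out : Int) : Decidable (Spec_evaluateHighestFreqWord sentence out) := by unfold Spec_evaluateHighestFreqWord; infer_instance

-- ===== CLAIM (what is proved, stated in full; the proofs are below) =====
def Claim_equal_evaluateHighestFreqWord : Prop := ∀ (sentence : String), Dom_evaluateHighestFreqWord sentence → Spec_evaluateHighestFreqWord sentence (evaluateHighestFreqWord sentence)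

-- ===== LEMMAS AND PROOFS =====

-- Python's lexicographic tuple comparison, as a Bool, is `<` on `Lex (Int × String)`.
theorem pv_lt2_decide (a1 b1 : Int) (a2 b2 : String) :
    (decide (a1 < b1) || !decide (b1 < a1) && decide (a2 < b2)) = decide (toLex (a1, a2) < toLex (b1, b2)) := by
  rcases lt_trichotomy a1 b1 with h | h | h
  · simp [Prod.Lex.lt_iff, h, asymm h]
  · subst h; simp [Prod.Lex.lt_iff]
  · simp [Prod.Lex.lt_iff, not_lt_of_gt h, ne_of_gt h, h]

-- max2? with components (Int, String) is max? with the Lex key.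
theorem pv_max2?_eq_max? {α : Type} (xs : List α) (k1 : α → Int) (k2 : α → String) :
    PySem.List.max2? xs k1 k2 = PySem.List.max? xs (fun x => toLex (k1 x, k2 x)) := by
  unfold PySem.List.max2? PySem.List.max?
  congr 1
  funext acc x
  cases acc with
  | none => rfl
  | some m => dsimp only; rw [pv_lt2_decide]; simp

-- sorted2 with components (Int, String) is sorted with the Lex key.
theorem pv_sorted2_eq_sorted {α : Type} (xs : List α) (k1 : α → Int) (k2 : α → String) :
    PySem.List.sorted2 xs k1 k2 false = PySem.List.sorted xs (fun x => toLex (k1 x, k2 x)) false := by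
  unfold PySem.List.sorted2 PySem.List.sorted
  simp only [Bool.false_eq_true, if_false]
  congr 1
  funext acc x
  congr 1
  funext a b
  exact pv_lt2_decide _ _ _ _

-- max? over a mapped list.
theorem pv_max?_map {α β κ : Type} [LT κ] [DecidableLT κ] (f : α → β) (key : β → κ) (l : List α) :
    PySem.List.max? (l.map f) key = Option.map f (PySem.List.max? l (fun x => key (f x))) := by
  unfold PySem.List.max?
  suffices h : ∀ acc : Option α,
      (l.map f).foldl (fun acc x => match acc with
        | none => some x
        | some m => if key m < key x then some x else some m) (Option.map f acc)
      = Option.map f (l.foldl (fun acc x => match acc with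
        | none => some x
        | some m => if key (f m) < key (f x) then some x else some m) acc) by
    simpa using h none
  intro acc
  induction l generalizing acc with
  | nil => rfl
  | cons x t ih =>
    cases acc with
    | none => simpa using ih (some x)
    | some m =>
      simp only [List.map_cons, List.foldl_cons, Option.map_some]
      split_ifs <;> [exact ih (some x); exact ih (some m)]

-- the last element of an ascending-Pairwise list dominates every element.
theorem pv_pairwise_getLast?_max {α κ : Type} [LinearOrder κ] (key : α → κ) :
    ∀ (l : List α), l.Pairwise (fun a b => key a ≤ key b) →
      ∀ L, l.getLast? = some L → ∀ y ∈ l, key y ≤ key L := by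
  intro l
  induction l with
  | nil => intro _ L hL; simp at hL
  | cons x t ih =>
    intro hp L hL y hy
    cases t with
    | nil =>
      simp at hL hy; subst hL; subst hy; exact le_refl _
    | cons z s =>
      have hL' : (z :: s).getLast? = some L := by
        simpa [List.getLast?_cons_cons] using hL
      have hp' := List.pairwise_cons.mp hp
      rcases List.mem_cons.mp hy with rfl | hy'
      · have hLmem : L ∈ z :: s := List.mem_of_getLast? hL'
        exact hp'.1 L hLmem
      · exact ih hp'.2 L hL' y hy'

-- for an injective key, Python's max (first maximal) is the last element of the ascending stable sort.
theorem pv_max?_eq_getLast?_sorted {α κ : Type} [LinearOrder κ] (key : α → κ)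
    (hinj : Function.Injective key) (l : List α) :
    PySem.List.max? l key = (PySem.List.sorted l key false).getLast? := by
  cases hl : PySem.List.max? l key with
  | none =>
    have : l = [] := (PySem.List.max?_eq_none_iff l key).mp hl
    subst this; rfl
  | some m =>
    have hm : m ∈ l := PySem.List.max?_mem hl
    have hmax := PySem.List.max?_isMax hl
    have hperm := PySem.List.sorted_perm l key false
    have hne : PySem.List.sorted l key false ≠ [] := by
      intro h
      rw [h] at hperm
      exact absurd (hperm.symm.mem_iff.mp hm) (List.not_mem_nil)
    obtain ⟨L, hL⟩ := Option.ne_none_iff_exists'.mp (mt List.getLast?_eq_none_iff.mp hne)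
    have hLmem : L ∈ l := hperm.mem_iff.mp (List.mem_of_getLast? hL)
    have h1 : key L ≤ key m := hmax L hLmem
    have h2 : key m ≤ key L :=
      pv_pairwise_getLast?_max key _ (PySem.List.sorted_pairwise l key) L hL m
        (hperm.mem_iff.mpr hm)
    rw [hL, hinj (le_antisymm h1 h2)]

-- xs[-1] is getLast?.
theorem pv_pyGet?_neg_one {α : Type} (l : List α) : PySem.List.pyGet? l (-1) = l.getLast? := by
  cases l with
  | nil => rfl
  | cons x t => simp [PySem.List.pyGet?, PySem.List.pyIdx?, List.getLast?_eq_getElem?]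

-- the key used on B's items, and its injectivity.
theorem pv_key_inj : Function.Injective (fun p : String × Int => toLex (p.2, p.1)) := by
  intro a b h
  have := toLex.injective h
  exact Prod.ext (congrArg Prod.snd this) (congrArg Prod.fst this)

-- A's and B's dict-building steps agree on every state.
theorem pv_step_eq (d : PySem.Dict String Int) (word : String) :
    (if d.contains word = false then d.insert word 1
     else d.insert word (d.getD word 0 + 1))
    = d.insert word (d.getD word 0 + 1) := by
  split_ifs with h
  · rw [PySem.Dict.getD_of_not_contains d 0 h]; norm_num
  · rfl

-- ===== VERDICT (by name: the statement is the Claim_ definition above) =====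
theorem evaluateHighestFreqWord_spec : Claim_equal_evaluateHighestFreqWord := by
  intro sentence _
  show evaluateHighestFreqWord sentence = evaluateHighestFreqWord_alt sentence
  unfold evaluateHighestFreqWord evaluateHighestFreqWord_alt
  simp only [pv_step_eq]
  set D := ((PySem.Str.split? sentence " ").getD []).foldl
      (fun d word => d.insert word (d.getD word 0 + 1)) ((PySem.Dict.empty : PySem.Dict String Int)) with hD
  have hzip : D.values.zip D.keys = D.items.map (fun p => (p.2, p.1)) := by
    simp only [PySem.Dict.values, PySem.Dict.keys, List.zip_map']
  rw [hzip, pv_max2?_eq_max?, pv_max?_map (fun p : String × Int => (p.2, p.1))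
      (fun q : Int × String => toLex (q.1, q.2)) D.items]
  rw [pv_sorted2_eq_sorted, pv_pyGet?_neg_one,
      ← pv_max?_eq_getLast?_sorted (fun p : String × Int => toLex (p.2, p.1)) pv_key_inj]
  cases PySem.List.max? D.items (fun p : String × Int => toLex (p.2, p.1)) with
  | none => rfl
  | some p => rfl
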